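-- pv_equiv track=rewrite | github.com/panyuwen/SequenceLibraryMake | idx_hopping_count.py | match_unique
-- ===== SOURCE A (Python) =====
-- def hamming_distance(a: str, b: str):
--     """Return Hamming distance if same length else None."""
--     if len(a) != len(b):
--         return None
--     return sum(x != y for x, y in zip(a, b))
--
-- def match_unique(obs: str, candidates: set, mm: int):
--     """
--     Return a uniquely matched candidate within <= mm mismatches.
--     If none or multiple best matches at same minimal distance, return None.
--     """
--     hits = []
--     if ('N' not in obs) and ('n' not in obs):
--         for cand in candidates:
--             d = hamming_distance(obs, cand)
--             if d is not None and d <= mm: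
--                 hits.append((d, cand))
--     if not hits:
--         return None
--     hits.sort(key=lambda x: (x[0], x[1]))  # sort by distance then lexicographically
--     min_d = hits[0][0]
--     winners = [c for d, c in hits if d == min_d]
--     return winners[0] if len(winners) == 1 else None
-- ===== SOURCE B (Python) =====
-- def match_unique(obs: str, candidates: set, mm: int):
--     """
--     Return a uniquely matched candidate within <= mm mismatches.
--     If none or multiple best matches at same minimal distance, return None.
--     Single pass: track minimal distance, its first winner and its multiplicity;
--     no hits list, no sort.
--     """
--     if 'N' in obs or 'n' in obs:
--         return None
--     n = len(obs)
--     best = None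
--     winner = None
--     count = 0
--     for cand in candidates:
--         if len(cand) != n:
--             continue
--         d = sum(x != y for x, y in zip(obs, cand))
--         if d > mm:
--             continue
--         if best is None or d < best:
--             best, winner, count = d, cand, 1
--         elif d == best:
--             count += 1
--     return winner if count == 1 else None
-- ===== Notes on version B (the rewrite author's own statement) =====
-- stated objective: alternative
-- what changed: replaced A's collect-all-hits, sort-by-(distance,string), filter-winners pipeline by a single pass that tracks the minimal distance, its first candidate and its multiplicity (no hits list, no sort)
import Mathlib
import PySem

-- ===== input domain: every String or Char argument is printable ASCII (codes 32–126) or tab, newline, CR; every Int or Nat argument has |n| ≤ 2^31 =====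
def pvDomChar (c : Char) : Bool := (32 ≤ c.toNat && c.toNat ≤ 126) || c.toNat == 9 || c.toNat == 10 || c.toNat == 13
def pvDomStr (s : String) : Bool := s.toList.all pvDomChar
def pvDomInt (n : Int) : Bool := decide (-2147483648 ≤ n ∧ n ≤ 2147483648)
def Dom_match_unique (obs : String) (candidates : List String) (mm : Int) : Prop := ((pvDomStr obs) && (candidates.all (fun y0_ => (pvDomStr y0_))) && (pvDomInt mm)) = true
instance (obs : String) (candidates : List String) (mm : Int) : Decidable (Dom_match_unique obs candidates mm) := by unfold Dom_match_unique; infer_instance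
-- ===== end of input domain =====

-- B replaces A's collect-hits / sort-by-(distance,string) / filter-winners pipeline by a
-- single pass tracking the minimal distance, its first candidate and its multiplicity.


-- ===== PORT A =====
def hamming_distance (a b : String) : Option Int :=
  if PySem.Str.len a ≠ PySem.Str.len b then none
  else some (((a.toList.zip b.toList).map (fun p => if p.1 ≠ p.2 then (1 : Int) else 0)).sum)

def match_unique (obs : String) (candidates : List String) (mm : Int) : Option String :=
  let hits : List (Int × String) :=
    if !(PySem.Str.isIn "N" obs) && !(PySem.Str.isIn "n" obs) then
      candidates.foldl (fun acc cand =>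
        match hamming_distance obs cand with
        | some d => if d ≤ mm then acc ++ [(d, cand)] else acc
        | none => acc) []
    else []
  if hits = [] then none
  else
    match PySem.List.sorted2 hits Prod.fst Prod.snd with
    | [] => none
    | h :: t =>
      let min_d := h.1
      let winners := ((h :: t).filter (fun p => p.1 == min_d)).map Prod.snd
      if winners.length = 1 then winners.head? else none

-- ===== PORT B =====
def match_unique_alt (obs : String) (candidates : List String) (mm : Int) : Option String :=
  if PySem.Str.isIn "N" obs || PySem.Str.isIn "n" obs then none
  else
    let n := PySem.Str.len obs
    let st := candidates.foldl (fun (st : Option Int × Option String × Int) cand =>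
      if PySem.Str.len cand ≠ n then st
      else
        let d := ((obs.toList.zip cand.toList).map (fun p => if p.1 ≠ p.2 then (1 : Int) else 0)).sum
        if mm < d then st
        else
          match st.1 with
          | none => (some d, some cand, 1)
          | some b =>
            if d < b then (some d, some cand, 1)
            else if d = b then (st.1, st.2.1, st.2.2 + 1)
            else st) (none, none, 0)
    if st.2.2 = 1 then st.2.1 else none

-- ===== PRECONDITION & SPEC =====
def Spec_match_unique (obs : String) (candidates : List String) (mm : Int) (out : Option String) : Prop := out = match_unique_alt obs candidates mm
instance (obs : String) (candidates : List String) (mm : Int) (out : Option String) : Decidable (Spec_match_unique obs candidates mm out) := by unfold Spec_match_unique; infer_instance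

-- ===== CLAIM (what is proved, stated in full; the proofs are below) =====
def Claim_equal_match_unique : Prop := ∀ (obs : String) (candidates : List String) (mm : Int), Dom_match_unique obs candidates mm → Spec_match_unique obs candidates mm (match_unique obs candidates mm)

-- ===== LEMMAS AND PROOFS =====

-- the (distance, candidate) pair a candidate contributes, if it does
def hitF (obs : String) (mm : Int) (cand : String) : Option (Int × String) :=
  if PySem.Str.len cand = PySem.Str.len obs then
    let d := ((obs.toList.zip cand.toList).map (fun p => if p.1 ≠ p.2 then (1 : Int) else 0)).sum
    if d ≤ mm then some (d, cand) else none
  else none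

-- B's fold step, abstracted over the contributed pair
def bstep (st : Option Int × Option String × Int) (p : Int × String) : Option Int × Option String × Int :=
  match st.1 with
  | none => (some p.1, some p.2, 1)
  | some b =>
    if p.1 < b then (some p.1, some p.2, 1)
    else if p.1 = b then (st.1, st.2.1, st.2.2 + 1)
    else st

-- common normal form of both results, as a function of the hits list
def specRes (l : List (Int × String)) : Option String :=
  match l with
  | [] => none
  | p :: t =>
    let m := (t.map Prod.fst).foldl min p.1
    match l.filter (fun q => q.1 == m) with
    | [x] => some x.2
    | _ => none

lemma astep_eq (obs : String) (mm : Int) (c : String) (acc : List (Int × String)) :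
    (match hamming_distance obs c with
     | some d => if d ≤ mm then acc ++ [(d, c)] else acc
     | none => acc) = acc ++ (hitF obs mm c).toList := by
  unfold hamming_distance hitF
  by_cases hl : PySem.Str.len c = PySem.Str.len obs
  · rw [if_neg (by omega : ¬ PySem.Str.len obs ≠ PySem.Str.len c), if_pos hl]
    by_cases hd : ((obs.toList.zip c.toList).map (fun p => if p.1 ≠ p.2 then (1 : Int) else 0)).sum ≤ mm
    · rw [if_pos hd]; simp only [Option.toList_some]
      rw [if_pos (by simpa [ite_not] using hd)]
    · rw [if_neg hd]; simp only [Option.toList_none, List.append_nil]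
      rw [if_neg (by simpa [ite_not] using hd)]
  · rw [if_pos (by omega : PySem.Str.len obs ≠ PySem.Str.len c), if_neg hl]; simp

lemma afold_eq (obs : String) (mm : Int) (cs : List String) (acc : List (Int × String)) :
    cs.foldl (fun acc cand =>
        match hamming_distance obs cand with
        | some d => if d ≤ mm then acc ++ [(d, cand)] else acc
        | none => acc) acc = acc ++ cs.filterMap (hitF obs mm) := by
  induction cs generalizing acc with
  | nil => simp
  | cons c cs ih =>
    rw [List.foldl_cons, List.filterMap_cons]
    rw [astep_eq, ih]
    cases h : hitF obs mm c <;> simp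

lemma bstep_eq (obs : String) (mm : Int) (c : String) (st : Option Int × Option String × Int) :
    (if PySem.Str.len c ≠ PySem.Str.len obs then st
     else
        let d := ((obs.toList.zip c.toList).map (fun p => if p.1 ≠ p.2 then (1 : Int) else 0)).sum
        if mm < d then st
        else
          match st.1 with
          | none => (some d, some c, 1)
          | some b =>
            if d < b then (some d, some c, 1)
            else if d = b then (st.1, st.2.1, st.2.2 + 1)
            else st)
    = (match hitF obs mm c with
       | none => st
       | some p => bstep st p) := by
  unfold hitF
  by_cases hl : PySem.Str.len c = PySem.Str.len obs
  · rw [if_neg (by omega : ¬ PySem.Str.len c ≠ PySem.Str.len obs), if_pos hl]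
    by_cases hd : ((obs.toList.zip c.toList).map (fun p => if p.1 ≠ p.2 then (1 : Int) else 0)).sum ≤ mm
    · rw [if_neg (by omega : ¬ mm < ((obs.toList.zip c.toList).map (fun p => if p.1 ≠ p.2 then (1 : Int) else 0)).sum)]
      simp only [if_pos hd]
      rfl
    · rw [if_pos (by omega : mm < ((obs.toList.zip c.toList).map (fun p => if p.1 ≠ p.2 then (1 : Int) else 0)).sum)]
      simp only [if_neg hd]
  · rw [if_pos (by exact fun h => hl h : PySem.Str.len c ≠ PySem.Str.len obs), if_neg hl]

lemma bfold_eq (obs : String) (mm : Int) (cs : List String) (st : Option Int × Option String × Int) :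
    cs.foldl (fun (st : Option Int × Option String × Int) cand =>
      if PySem.Str.len cand ≠ PySem.Str.len obs then st
      else
        let d := ((obs.toList.zip cand.toList).map (fun p => if p.1 ≠ p.2 then (1 : Int) else 0)).sum
        if mm < d then st
        else
          match st.1 with
          | none => (some d, some cand, 1)
          | some b =>
            if d < b then (some d, some cand, 1)
            else if d = b then (st.1, st.2.1, st.2.2 + 1)
            else st) st = (cs.filterMap (hitF obs mm)).foldl bstep st := by
  induction cs generalizing st with
  | nil => simp
  | cons c cs ih =>
    rw [List.foldl_cons, List.filterMap_cons, bstep_eq]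
    cases h : hitF obs mm c
    · rw [ih]
    · rw [List.foldl_cons, ih]

lemma bfold_inv (t : List (Int × String)) (b : Int) (w : String) (k : Int) :
    t.foldl bstep (some b, some w, k) =
      (some ((t.map Prod.fst).foldl min b),
       (if (t.map Prod.fst).foldl min b = b then some w
        else ((t.filter (fun q => q.1 == (t.map Prod.fst).foldl min b)).head?).map Prod.snd),
       (if (t.map Prod.fst).foldl min b = b then k + (t.countP (fun q => q.1 == b) : Int)
        else (t.countP (fun q => q.1 == (t.map Prod.fst).foldl min b) : Int))) := by
  induction t generalizing b w k with
  | nil => simp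
  | cons q t ih =>
    have hle : (t.map Prod.fst).foldl min (min b q.1) ≤ min b q.1 :=
      (PySem.List.foldl_min_le (t.map Prod.fst) (min b q.1)).1
    rw [List.foldl_cons, List.map_cons, List.foldl_cons]
    rcases lt_trichotomy q.1 b with hqb | hqb | hqb
    · have hstep : bstep (some b, some w, k) q = (some q.1, some q.2, 1) := by
        simp [bstep, hqb]
      rw [hstep, ih, min_eq_right hqb.le]
      have hMb : (t.map Prod.fst).foldl min q.1 ≠ b := by
        have := (PySem.List.foldl_min_le (t.map Prod.fst) q.1).1
        omega
      rw [if_neg hMb, if_neg hMb]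
      by_cases hM : (t.map Prod.fst).foldl min q.1 = q.1
      · rw [if_pos hM, if_pos hM]
        simp [hM]
        omega
      · rw [if_neg hM, if_neg hM]
        have : (q.1 == (t.map Prod.fst).foldl min q.1) = false := by
          simp; omega
        simp [this]
    · have hstep : bstep (some b, some w, k) q = (some b, some w, k + 1) := by
        simp [bstep, hqb]
      rw [hstep, ih, hqb, min_self]
      by_cases hM : (t.map Prod.fst).foldl min b = b
      · rw [if_pos hM, if_pos hM, if_pos hM]
        have : (q.1 == b) = true := by simp [hqb]
        simp [this, hM]
        omega
      · rw [if_neg hM, if_neg hM, if_neg hM]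
        have hlt : (t.map Prod.fst).foldl min b ≤ b :=
          (PySem.List.foldl_min_le (t.map Prod.fst) b).1
        have : (q.1 == (t.map Prod.fst).foldl min b) = false := by
          simp; omega
        simp [this]
        exact fun h => absurd h hM
    · have hstep : bstep (some b, some w, k) q = (some b, some w, k) := by
        simp [bstep, not_lt.mpr hqb.le, hqb.ne']
      rw [hstep, ih, min_eq_left hqb.le]
      by_cases hM : (t.map Prod.fst).foldl min b = b
      · rw [if_pos hM, if_pos hM, if_pos hM]
        have : (q.1 == b) = false := by simp; omega
        simp [List.countP_cons, this]
        exact fun h => absurd hM h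
      · rw [if_neg hM, if_neg hM, if_neg hM]
        have hlt : (t.map Prod.fst).foldl min b ≤ b :=
          (PySem.List.foldl_min_le (t.map Prod.fst) b).1
        have : (q.1 == (t.map Prod.fst).foldl min b) = false := by
          simp; omega
        simp [this]
        exact fun h => absurd h hM

-- the lexicographic comparison sorted2 uses on (distance, candidate) pairs
def lexlt (a b : Int × String) : Bool :=
  decide (a.1 < b.1) || (!decide (b.1 < a.1) && decide (a.2 < b.2))

-- "the head has minimal first component" invariant
def HeadMin (ys : List (Int × String)) : Prop :=
  ∀ hd ∈ ys.head?, ∀ z ∈ ys, hd.1 ≤ z.1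

lemma insertBy_headMin (x : Int × String) (ys : List (Int × String)) (hP : HeadMin ys) :
    HeadMin (PySem.List.insertBy lexlt x ys) := by
  cases ys with
  | nil =>
    intro hd hhd z hz
    simp [PySem.List.insertBy] at hhd hz
    simp [hhd, hz]
  | cons y ys =>
    by_cases hb : lexlt x y = true
    · have hxy : x.1 ≤ y.1 := by
        simp [lexlt] at hb
        rcases hb with h | ⟨h, _⟩ <;> omega
      intro hd hhd z hz
      simp [PySem.List.insertBy, hb] at hhd hz
      subst hhd
      rcases hz with rfl | rfl | h
      · omega
      · omega
      · have := hP y (by simp) z (by simp [h])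
        omega
    · have hyx : y.1 ≤ x.1 := by
        simp [lexlt] at hb
        omega
      intro hd hhd z hz
      simp [PySem.List.insertBy, hb] at hhd hz
      subst hhd
      rcases hz with rfl | h
      · omega
      · rcases (PySem.List.insertBy_mem_iff lexlt x z ys).mp h with rfl | h'
        · omega
        · exact hP y (by simp) z (by simp [h'])

lemma foldl_insertBy_headMin (l : List (Int × String)) (acc : List (Int × String))
    (hP : HeadMin acc) :
    HeadMin (l.foldl (fun acc x => PySem.List.insertBy lexlt x acc) acc) := by
  induction l generalizing acc with
  | nil => exact hP
  | cons x l ih => exact ih _ (insertBy_headMin x acc hP)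

-- head of the sorted2 list has minimal first component
lemma sorted2_head_fst_min (l : List (Int × String)) {h : Int × String} {t : List (Int × String)}
    (e : PySem.List.sorted2 l Prod.fst Prod.snd = h :: t) : ∀ y ∈ l, h.1 ≤ y.1 := by
  intro y hy
  have hdef : PySem.List.sorted2 l Prod.fst Prod.snd
      = l.foldl (fun acc x => PySem.List.insertBy lexlt x acc) [] := rfl
  have hm : HeadMin (PySem.List.sorted2 l Prod.fst Prod.snd) := by
    rw [hdef]
    exact foldl_insertBy_headMin l [] (by intro hd hhd z hz; simp at hhd)
  have hy' : y ∈ PySem.List.sorted2 l Prod.fst Prod.snd :=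
    ((PySem.List.sorted2_perm l Prod.fst Prod.snd false).mem_iff).mpr hy
  rw [e] at hm hy'
  exact hm h (by simp) y hy'

lemma a_eq_spec (l : List (Int × String)) :
    (if l = [] then (none : Option String)
     else
       match PySem.List.sorted2 l Prod.fst Prod.snd with
       | [] => none
       | h :: t =>
         if (((h :: t).filter (fun p => p.1 == h.1)).map Prod.snd).length = 1
         then (((h :: t).filter (fun p => p.1 == h.1)).map Prod.snd).head? else none) = specRes l := by
  cases l with
  | nil => simp [specRes]
  | cons p t =>
    rw [if_neg (List.cons_ne_nil p t)]
    cases hs : PySem.List.sorted2 (p :: t) Prod.fst Prod.snd with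
    | nil =>
      exact absurd (congrArg List.length hs)
        (by simp [(PySem.List.sorted2_perm (p :: t) Prod.fst Prod.snd false).length_eq])
    | cons h hs' =>
      -- the head of the sorted list carries the minimal distance
      have hmem : h ∈ p :: t := by
        have : h ∈ PySem.List.sorted2 (p :: t) Prod.fst Prod.snd := by simp [hs]
        exact ((PySem.List.sorted2_perm (p :: t) Prod.fst Prod.snd false).mem_iff).mp this
      have hminle : ∀ y ∈ p :: t, (t.map Prod.fst).foldl min p.1 ≤ y.1 := by
        intro y hy
        rcases List.mem_cons.mp hy with h' | hy'
        · rw [h']; exact (PySem.List.foldl_min_le (t.map Prod.fst) p.1).1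
        · exact (PySem.List.foldl_min_le (t.map Prod.fst) p.1).2 y.1 (List.mem_map_of_mem hy')
      have hattain : ∃ y ∈ p :: t, y.1 = (t.map Prod.fst).foldl min p.1 := by
        rcases PySem.List.foldl_min_mem (t.map Prod.fst) p.1 with hcase | hcase
        · exact ⟨p, by simp, hcase.symm⟩
        · rcases List.mem_map.mp hcase with ⟨q, hq, hq1⟩
          exact ⟨q, List.mem_cons_of_mem p hq, hq1⟩
      have hh1 : h.1 = (t.map Prod.fst).foldl min p.1 := by
        rcases hattain with ⟨y, hy, hy1⟩
        have h1 := sorted2_head_fst_min (p :: t) hs y hy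
        have h2 := hminle h hmem
        omega
      have hperm : ((h :: hs').filter (fun q => q.1 == h.1)).Perm
          ((p :: t).filter (fun q => q.1 == h.1)) := by
        rw [← hs]
        exact (PySem.List.sorted2_perm (p :: t) Prod.fst Prod.snd false).filter _
      simp only [specRes, hh1]
      cases hfl : (p :: t).filter (fun q => q.1 == (t.map Prod.fst).foldl min p.1) with
      | nil =>
        rw [hh1] at hperm
        rw [hfl] at hperm
        rw [List.perm_nil.mp hperm]
        simp
      | cons x r =>
        cases r with
        | nil =>
          rw [hh1] at hperm
          rw [hfl] at hperm
          rw [List.perm_singleton.mp hperm]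
          simp
        | cons y r' =>
          rw [hh1] at hperm
          rw [hfl] at hperm
          have hlen : (((h :: hs').filter (fun q => q.1 == (t.map Prod.fst).foldl min p.1)).map Prod.snd).length
              = r'.length + 2 := by
            rw [List.length_map, hperm.length_eq]
            simp
          rw [if_neg (by omega)]

lemma b_eq_spec (l : List (Int × String)) :
    (if (l.foldl bstep (none, none, 0)).2.2 = 1 then (l.foldl bstep (none, none, 0)).2.1 else none)
      = specRes l := by
  cases l with
  | nil => simp [specRes]
  | cons p t =>
    have hstep : bstep (none, none, 0) p = (some p.1, some p.2, 1) := rfl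
    rw [List.foldl_cons, hstep, bfold_inv]
    simp only [specRes]
    by_cases hM : (t.map Prod.fst).foldl min p.1 = p.1
    · rw [if_pos hM, if_pos hM]
      have hfil : (p :: t).filter (fun q => q.1 == (t.map Prod.fst).foldl min p.1)
          = p :: t.filter (fun q => q.1 == p.1) := by
        rw [hM]; simp
      rw [hfil]
      have hcount : (t.countP (fun q => q.1 == p.1)) = (t.filter (fun q => q.1 == p.1)).length :=
        List.countP_eq_length_filter
      cases hft : t.filter (fun q => q.1 == p.1) with
      | nil =>
        rw [if_pos (by rw [hcount, hft]; simp)]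
      | cons x r =>
        rw [if_neg (by rw [hcount, hft]; simp; omega)]
    · rw [if_neg hM, if_neg hM]
      have hple : (t.map Prod.fst).foldl min p.1 ≤ p.1 :=
        (PySem.List.foldl_min_le (t.map Prod.fst) p.1).1
      have hfil : (p :: t).filter (fun q => q.1 == (t.map Prod.fst).foldl min p.1)
          = t.filter (fun q => q.1 == (t.map Prod.fst).foldl min p.1) := by
        simp only [List.filter_cons]
        rw [if_neg (by simp; omega)]
      rw [hfil]
      have hcount : (t.countP (fun q => q.1 == (t.map Prod.fst).foldl min p.1))
          = (t.filter (fun q => q.1 == (t.map Prod.fst).foldl min p.1)).length :=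
        List.countP_eq_length_filter
      cases hft : t.filter (fun q => q.1 == (t.map Prod.fst).foldl min p.1) with
      | nil =>
        rw [if_neg (by rw [hcount, hft]; simp)]
      | cons x r =>
        cases r with
        | nil =>
          rw [if_pos (by rw [hcount, hft]; simp)]
          simp
        | cons y r' =>
          rw [if_neg (by rw [hcount, hft]; simp; omega)]

-- ===== VERDICT (by name: the statement is the Claim_ definition above) =====
theorem match_unique_spec : Claim_equal_match_unique := by
  intro obs candidates mm _
  show match_unique obs candidates mm = match_unique_alt obs candidates mm
  by_cases hN : PySem.Str.isIn "N" obs = true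
  · have h1 : (!PySem.Str.isIn "N" obs && !PySem.Str.isIn "n" obs) = false := by
      rw [hN]; rfl
    have h2 : (PySem.Str.isIn "N" obs || PySem.Str.isIn "n" obs) = true := by
      rw [hN]; rfl
    unfold match_unique match_unique_alt
    rw [h1, h2]
    rfl
  · have hN' : PySem.Str.isIn "N" obs = false := by simpa using hN
    by_cases hn : PySem.Str.isIn "n" obs = true
    · have h1 : (!PySem.Str.isIn "N" obs && !PySem.Str.isIn "n" obs) = false := by
        rw [hn]; simp
      have h2 : (PySem.Str.isIn "N" obs || PySem.Str.isIn "n" obs) = true := by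
        rw [hn]; simp
      unfold match_unique match_unique_alt
      rw [h1, h2]
      rfl
    · have hn' : PySem.Str.isIn "n" obs = false := by simpa using hn
      have h1 : (!PySem.Str.isIn "N" obs && !PySem.Str.isIn "n" obs) = true := by
        rw [hN', hn']; rfl
      have h2 : (PySem.Str.isIn "N" obs || PySem.Str.isIn "n" obs) = false := by
        rw [hN', hn']; rfl
      have e1 : match_unique obs candidates mm
          = specRes (candidates.foldl (fun acc cand =>
              match hamming_distance obs cand with
              | some d => if d ≤ mm then acc ++ [(d, cand)] else acc
              | none => acc) []) := by
        unfold match_unique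
        rw [h1]
        exact a_eq_spec _
      have e2 : match_unique_alt obs candidates mm
          = specRes (candidates.filterMap (hitF obs mm)) := by
        unfold match_unique_alt
        rw [h2]
        have hb := b_eq_spec (candidates.filterMap (hitF obs mm))
        rw [← bfold_eq] at hb
        exact hb
      rw [e1, afold_eq, List.nil_append, ← e2]
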